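-- pv_equiv track=rewrite | github.com/Dontcallcook/py110 | lesson_1/pedac2.py | sum_generator
-- ===== SOURCE A (Python) =====
-- def row_maker(requested_row):
--         number_list = []
--         index = 0
--         while index < requested_row:
--             number_list.append([])
--             index += 1
--         return number_list
--
-- def sum_generator(requested_row):
--     number_list = row_maker(requested_row)
--     number_list_index = 0
--     row = 1
--     number = 2
--
--     while row <= requested_row:
--         number_list[number_list_index].append(number)
--         number += 2
--         if row == len(number_list[number_list_index]):
--             row += 1
--             number_list_index += 1
--
--     return sum(number_list[number_list_index - 1])
-- ===== SOURCE B (Python) =====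
-- def sum_generator(requested_row):
--     return requested_row ** 3 + requested_row
-- ===== Notes on version B (the rewrite author's own statement) =====
-- stated objective: faster
-- what changed: Replaces the O(n^2) triangle-building simulation (append every even number row by row, then sum the last row) with the closed form n^3 + n for the sum of the n-th row.
import Mathlib
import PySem

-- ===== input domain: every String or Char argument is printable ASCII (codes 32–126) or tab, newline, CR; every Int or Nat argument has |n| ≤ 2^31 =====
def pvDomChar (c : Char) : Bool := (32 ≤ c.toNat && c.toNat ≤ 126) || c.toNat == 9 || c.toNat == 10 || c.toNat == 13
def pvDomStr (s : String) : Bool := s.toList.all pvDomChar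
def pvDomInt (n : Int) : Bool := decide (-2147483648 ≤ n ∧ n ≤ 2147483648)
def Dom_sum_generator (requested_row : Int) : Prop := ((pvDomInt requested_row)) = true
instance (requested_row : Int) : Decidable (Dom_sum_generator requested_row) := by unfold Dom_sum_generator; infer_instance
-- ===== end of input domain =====

-- B replaces A's O(n^2) row-by-row triangle construction with the closed form n^3 + n.

-- ===== PORT A =====
-- row_maker: `while index < requested_row: number_list.append([])`
def rowMakerLoop (requested_row index : Int) (number_list : List (List Int)) :
    List (List Int) :=
  if index < requested_row then
    rowMakerLoop requested_row (index + 1) (number_list ++ [[]])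
  else number_list
termination_by (requested_row - index).toNat
decreasing_by omega

def row_maker (requested_row : Int) : List (List Int) :=
  rowMakerLoop requested_row 0 []

-- the main `while row <= requested_row` loop; the fuel argument only makes the
-- recursion total (it is chosen large enough to never run out on the loop's
-- reachable states) — each step is the Python loop body verbatim.
def sumGenLoop (fuel : Nat) (requested_row : Int) (number_list : List (List Int))
    (number_list_index : Nat) (row number : Int) : List (List Int) × Nat :=
  match fuel with
  | 0 => (number_list, number_list_index)
  | fuel + 1 =>
    if row ≤ requested_row then
      let cur := (PySem.List.pyGet? number_list (number_list_index : Int)).getD []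
      let nl' := number_list.set number_list_index (cur ++ [number])
      if row = ((cur ++ [number]).length : Int) then
        sumGenLoop fuel requested_row nl' (number_list_index + 1) (row + 1) (number + 2)
      else
        sumGenLoop fuel requested_row nl' number_list_index row (number + 2)
    else (number_list, number_list_index)

def sum_generator (requested_row : Int) : Int :=
  let number_list := row_maker requested_row
  let res := sumGenLoop ((requested_row.toNat + 1) * (requested_row.toNat + 1))
      requested_row number_list 0 1 2
  ((PySem.List.pyGet? res.1 ((res.2 : Int) - 1)).getD []).sum

-- ===== PORT B =====
def sum_generator_alt (requested_row : Int) : Int :=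
  requested_row ^ 3 + requested_row

-- ===== PRECONDITION & SPEC =====
-- A raises IndexError for requested_row < 1 (it reads the last row of an empty triangle).
def Pre_sum_generator (requested_row : Int) : Prop := 1 ≤ requested_row
instance (requested_row : Int) : Decidable (Pre_sum_generator requested_row) := by
  unfold Pre_sum_generator; infer_instance
def pvWitness_sum_generator : Int := 3

def Spec_sum_generator (requested_row : Int) (out : Int) : Prop :=
  out = sum_generator_alt requested_row
instance (requested_row : Int) (out : Int) : Decidable (Spec_sum_generator requested_row out) := by
  unfold Spec_sum_generator; infer_instance

-- ===== CLAIM (what is proved, stated in full; the proofs are below) =====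
def Claim_equal_sum_generator : Prop := ∀ (requested_row : Int),
  Dom_sum_generator requested_row → Pre_sum_generator requested_row →
  Spec_sum_generator requested_row (sum_generator requested_row)

-- ===== LEMMAS AND PROOFS =====

-- row k of the triangle, as an arithmetic progression of step 2
def eRow (s : Int) (k : Nat) : List Int := (List.range k).map (fun i => s + 2 * i)

lemma eRow_zero (s : Int) : eRow s 0 = [] := by simp [eRow]

lemma eRow_succ (s : Int) (k : Nat) : eRow s (k + 1) = eRow s k ++ [s + 2 * k] := by
  simp [eRow, List.range_succ]

lemma eRow_sum (s : Int) (k : Nat) : (eRow s k).sum = k * s + k * (k - 1) := by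
  induction k with
  | zero => simp [eRow]
  | succ k ih =>
    rw [eRow_succ]
    simp only [List.sum_append, List.sum_cons, List.sum_nil, ih]
    push_cast
    ring

lemma rowMakerLoop_eq (requested_row index : Int) (acc : List (List Int)) :
    rowMakerLoop requested_row index acc =
      acc ++ List.replicate (requested_row - index).toNat [] := by
  by_cases h : index < requested_row
  · rw [rowMakerLoop, if_pos h, rowMakerLoop_eq]
    have : (requested_row - index).toNat = (requested_row - (index + 1)).toNat + 1 := by omega
    rw [this, List.replicate_succ, List.append_assoc]
    rfl
  · rw [rowMakerLoop, if_neg h]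
    have : (requested_row - index).toNat = 0 := by omega
    simp [this]
termination_by (requested_row - index).toNat
decreasing_by omega

-- fuel needed from a state "filling row `row`, j entries already in it"
def fuelNeed (n row : Int) (j : Nat) : Nat :=
  (n - row).toNat * (n.toNat + 1) + (row - j).toNat

-- loop invariant: from a state that is filling row `row` (which already holds the
-- first j numbers of that row), with the right next number, the loop ends with the
-- index one past the last row and the last row fully built.
lemma sumGenLoop_inv (fuel : Nat) :
    ∀ (n row : Int) (j : Nat) (front : List (List Int)),
      1 ≤ row → row ≤ n → (j : Int) < row →
      fuelNeed n row j ≤ fuel →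
      ∃ nl', sumGenLoop fuel n
          (front ++ eRow (row ^ 2 - row + 2) j :: List.replicate (n - row).toNat [])
          front.length row (row ^ 2 - row + 2 + 2 * j)
        = (nl', front.length + (n - row).toNat + 1) ∧
        PySem.List.pyGet? nl' ((front.length + (n - row).toNat : Nat) : Int)
          = some (eRow (n ^ 2 - n + 2) n.toNat) := by
  induction fuel with
  | zero =>
    intro n row j front h1 h2 hj hf
    exfalso
    have : 1 ≤ (row - j).toNat := by omega
    simp [fuelNeed] at hf
    omega
  | succ fuel ih =>
    intro n row j front h1 h2 hj hf
    rw [sumGenLoop, if_pos h2]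
    simp only [PySem.List.pyGet?_append_length, Option.getD_some]
    have hset : (front ++ eRow (row ^ 2 - row + 2) j :: List.replicate (n - row).toNat []).set
        front.length (eRow (row ^ 2 - row + 2) j ++ [row ^ 2 - row + 2 + 2 * j])
        = front ++ eRow (row ^ 2 - row + 2) (j + 1) :: List.replicate (n - row).toNat [] := by
      rw [← eRow_succ, List.set_append_right _ _ (le_refl _)]
      simp
    have hlen : ((eRow (row ^ 2 - row + 2) j ++ [row ^ 2 - row + 2 + 2 * j]).length : Int)
        = (j : Int) + 1 := by
      simp [eRow]
    rw [hset, hlen]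
    by_cases hcase : row = (j : Int) + 1
    · rw [if_pos hcase]
      by_cases hrn : row = n
      · -- final row just finished: the next call exits (or fuel is 0) with the same state
        have hnr : (n - row).toNat = 0 := by omega
        have hjn : j + 1 = n.toNat := by omega
        have key : sumGenLoop fuel n
            (front ++ eRow (row ^ 2 - row + 2) (j + 1) :: List.replicate (n - row).toNat [])
            (front.length + 1) (row + 1) (row ^ 2 - row + 2 + 2 * j + 2)
            = (front ++ eRow (row ^ 2 - row + 2) (j + 1) :: List.replicate (n - row).toNat [],
               front.length + 1) := by
          cases fuel with
          | zero => rfl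
          | succ fuel => rw [sumGenLoop, if_neg (by omega)]
        refine ⟨front ++ eRow (row ^ 2 - row + 2) (j + 1) :: List.replicate (n - row).toNat [],
          ?_, ?_⟩
        · rw [key, hnr]
        · rw [hnr, hjn, hrn]
          simp
      · -- row < n: the finished row joins `front`, start row+1 empty
        have hrow : row < n := lt_of_le_of_ne h2 hrn
        have hrep : List.replicate (n - row).toNat ([] : List Int)
            = [] :: List.replicate (n - (row + 1)).toNat [] := by
          have : (n - row).toNat = (n - (row + 1)).toNat + 1 := by omega
          rw [this, List.replicate_succ]
        have hnum : row ^ 2 - row + 2 + 2 * j + 2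
            = (row + 1) ^ 2 - (row + 1) + 2 + 2 * (0 : Nat) := by
          have : (j : Int) = row - 1 := by omega
          rw [this]; push_cast; ring
        have hfuel : fuelNeed n (row + 1) 0 ≤ fuel := by
          have e1 : (n - row).toNat = (n - (row + 1)).toNat + 1 := by omega
          have e2 : (n - row).toNat * (n.toNat + 1)
              = (n - (row + 1)).toNat * (n.toNat + 1) + (n.toNat + 1) := by
            rw [e1, Nat.succ_mul]
          have e3 : (row + 1 - 0).toNat ≤ n.toNat + 1 := by omega
          simp only [fuelNeed] at hf ⊢
          omega
        obtain ⟨nl', hrun, hget⟩ :=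
          ih n (row + 1) 0 (front ++ [eRow (row ^ 2 - row + 2) (j + 1)])
            (by omega) (by omega) (by omega) hfuel
        refine ⟨nl', ?_, ?_⟩
        · rw [hrep, hnum]
          have hfr : front ++ eRow (row ^ 2 - row + 2) (j + 1) ::
              ([] :: List.replicate (n - (row + 1)).toNat [])
              = (front ++ [eRow (row ^ 2 - row + 2) (j + 1)]) ++
                eRow ((row + 1) ^ 2 - (row + 1) + 2) 0 :: List.replicate (n - (row + 1)).toNat [] := by
            simp [eRow_zero]
          have hfl : (front ++ [eRow (row ^ 2 - row + 2) (j + 1)]).length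
              = front.length + 1 := by simp
          rw [hfr, ← hfl]
          have : (n - row).toNat = (n - (row + 1)).toNat + 1 := by omega
          rw [hrun]
          congr 1
          omega
        · have : front.length + (n - row).toNat
              = (front ++ [eRow (row ^ 2 - row + 2) (j + 1)]).length + (n - (row + 1)).toNat := by
            simp; omega
          rw [this]
          exact hget
    · -- same row, one more number
      rw [if_neg hcase]
      have hj1 : ((j : Int) + 1) < row := by
        rcases lt_or_eq_of_le (by omega : (j : Int) + 1 ≤ row) with h | h
        · exact h
        · exact absurd h.symm hcase
      have hfuel : fuelNeed n row (j + 1) ≤ fuel := by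
        simp only [fuelNeed] at hf ⊢
        omega
      have hnum : row ^ 2 - row + 2 + 2 * j + 2
          = row ^ 2 - row + 2 + 2 * ((j : Nat) + 1) := by ring
      obtain ⟨nl', hrun, hget⟩ := ih n row (j + 1) front h1 h2 (by exact_mod_cast hj1) hfuel
      exact ⟨nl', by rw [hnum]; exact hrun, hget⟩

-- ===== VERDICT (by name: the statement is the Claim_ definition above) =====
theorem sum_generator_spec : Claim_equal_sum_generator := by
  intro n _ hpre
  have h1 : (1 : Int) ≤ n := hpre
  unfold Spec_sum_generator sum_generator sum_generator_alt
  have hrm : row_maker n = List.replicate n.toNat [] := by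
    rw [row_maker, rowMakerLoop_eq]
    simp
  have hinit : List.replicate n.toNat ([] : List Int)
      = ([] : List (List Int)) ++ eRow ((1 : Int) ^ 2 - 1 + 2) 0 :: List.replicate (n - 1).toNat [] := by
    have : n.toNat = (n - 1).toNat + 1 := by omega
    rw [this, List.replicate_succ]
    simp [eRow_zero]
  have hfuel : fuelNeed n 1 0 ≤ (n.toNat + 1) * (n.toNat + 1) := by
    have e1 : (n - 1).toNat ≤ n.toNat := by omega
    have e2 : (n - 1).toNat * (n.toNat + 1) ≤ n.toNat * (n.toNat + 1) :=
      Nat.mul_le_mul_right _ e1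
    have e3 : (n.toNat + 1) * (n.toNat + 1) = n.toNat * (n.toNat + 1) + (n.toNat + 1) := by ring
    simp only [fuelNeed]
    omega
  obtain ⟨nl', hrun, hget⟩ := sumGenLoop_inv ((n.toNat + 1) * (n.toNat + 1)) n 1 0 []
    (le_refl _) h1 (by norm_num) hfuel
  have hnum : ((1 : Int) ^ 2 - 1 + 2 + 2 * (0 : Nat)) = 2 := by norm_num
  have hstart : sumGenLoop ((n.toNat + 1) * (n.toNat + 1)) n (row_maker n) 0 1 2
      = (nl', 0 + (n - 1).toNat + 1) := by
    rw [hrm, hinit, ← hnum]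
    simpa using hrun
  simp only [hstart]
  have hidx : (((0 + (n - 1).toNat + 1 : Nat) : Int) - 1) = (((n - 1).toNat : Nat) : Int) := by
    push_cast; ring
  rw [hidx]
  have hget' : PySem.List.pyGet? nl' (((n - 1).toNat : Nat) : Int)
      = some (eRow (n ^ 2 - n + 2) n.toNat) := by
    simpa using hget
  rw [hget', Option.getD_some, eRow_sum]
  have hcast : ((n.toNat : Int)) = n := by omega
  rw [hcast]
  ring
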